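-- pv_equiv track=rewrite | github.com/cmin0717/Algorithm | 2023-05(백준,프로그래머스)/공 이동 시뮬레이션.py | solution
-- ===== SOURCE A (Python) =====
-- def solution(n, m, x, y, queries):
--     # 공이 이동할수있는 좌표 범위를 입력해준다. 처음에는 공의 현재 위치를 담는다.
--     i,i1,j,j1 = x,x,y,y
--
--     # 쿼리를 역순으로 돌리면서 공이 이동할수있는 범위를 구한다.
--     for a,b in queries[::-1]:
--         # 1번 타입 쿼리 : b만큼 y좌측 이동(우리는 우측으로 이동한다. 현재 역순으로 가고 있기에)
--         if a == 0:
--             # 최대범위 안에 들어오게 조정한다.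
--             j1 = min(j1+b,m-1)
--             if j == 0: continue
--             elif j+b < m:
--                 j = j+b
--             else: return 0
--         # 2번 타입 쿼리 : b만큼 y 우측 이동
--         elif a == 1:
--             j = max(0,j-b)
--             if j1 == m-1: continue
--             elif j1-b >= 0:
--                 j1 = j1-b
--             else: return 0
--         # 3번 타입 쿼리 : b만큼 x 위로 이동
--         elif a == 2:
--             i1 = min(i1+b, n-1)
--             if i == 0: continue
--             elif i+b < n:
--                 i = min(i+b, n-1)
--             else: return 0
--         # 4번 타입 쿼리 : b만큼 x 아래로 이동
--         else:
--             i = max(i-b, 0)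
--             if i1 == n-1: continue
--             elif i1-b >= 0:
--                 i1 = max(i1-b,0)
--             else: return 0
--
--     # 최종 주어진 공의 범위를 계산해서 출력
--     return (abs(i-i1) + 1) * (abs(j-j1) + 1)
-- ===== SOURCE B (Python) =====
-- def range_after(lo, hi, limit, moves):
--     # Walk the axis' moves (already in reversed-query order), maintaining the
--     # reachable interval [lo, hi]; return its width, or 0 if it collapses.
--     for fwd, b in moves:
--         if fwd:
--             hi = min(hi + b, limit - 1)
--             if lo == 0:
--                 continue
--             elif lo + b < limit:
--                 lo = lo + b
--             else:
--                 return 0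
--         else:
--             lo = max(0, lo - b)
--             if hi == limit - 1:
--                 continue
--             elif hi - b >= 0:
--                 hi = hi - b
--             else:
--                 return 0
--     return abs(hi - lo) + 1
--
--
-- def solution(n, m, x, y, queries):
--     # Split the reversed queries into per-axis move lists, then handle each
--     # axis with one generic interval routine and multiply the two widths.
--     y_moves, x_moves = [], []
--     for a, b in reversed(queries):
--         if a == 0:
--             y_moves.append((True, b))
--         elif a == 1:
--             y_moves.append((False, b))
--         elif a == 2:
--             x_moves.append((True, b))
--         else:
--             x_moves.append((False, b))
--     return range_after(x, x, n, x_moves) * range_after(y, y, m, y_moves)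
-- ===== Notes on version B (the rewrite author's own statement) =====
-- stated objective: simpler
-- what changed: The four near-duplicate per-type branches are factored out: one pass splits the reversed queries into per-axis move lists, and a single generic interval routine range_after is applied once per axis, the answer being the product of the two widths.
import Mathlib
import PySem

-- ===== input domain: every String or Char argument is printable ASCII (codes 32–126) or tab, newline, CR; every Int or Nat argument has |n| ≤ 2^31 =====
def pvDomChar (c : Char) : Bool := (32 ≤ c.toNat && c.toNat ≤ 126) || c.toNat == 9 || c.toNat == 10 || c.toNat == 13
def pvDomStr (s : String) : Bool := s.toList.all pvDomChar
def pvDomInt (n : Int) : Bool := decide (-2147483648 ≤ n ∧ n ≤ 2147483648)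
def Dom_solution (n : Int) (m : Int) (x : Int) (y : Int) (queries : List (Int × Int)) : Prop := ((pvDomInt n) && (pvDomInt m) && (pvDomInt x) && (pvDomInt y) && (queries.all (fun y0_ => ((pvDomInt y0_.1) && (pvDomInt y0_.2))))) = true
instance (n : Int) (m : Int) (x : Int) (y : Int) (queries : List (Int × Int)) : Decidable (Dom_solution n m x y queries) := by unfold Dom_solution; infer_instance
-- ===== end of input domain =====

-- B factors A's four near-duplicate branches into one generic per-axis interval
-- routine applied twice (objective: simpler); same values everywhere.

-- ===== PORT A =====
-- the reversed-query loop of A, with its early 'return 0'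
def solGo (n : Int) (m : Int) : Int → Int → Int → Int → List (Int × Int) → Int
  | i, i1, j, j1, [] => (|i - i1| + 1) * (|j - j1| + 1)
  | i, i1, j, j1, (a, b) :: rest =>
    if a == 0 then
      let j1' := min (j1 + b) (m - 1)
      if j == 0 then solGo n m i i1 j j1' rest
      else if j + b < m then solGo n m i i1 (j + b) j1' rest
      else 0
    else if a == 1 then
      let j' := max 0 (j - b)
      if j1 == m - 1 then solGo n m i i1 j' j1 rest
      else if j1 - b ≥ 0 then solGo n m i i1 j' (j1 - b) rest
      else 0
    else if a == 2 then
      let i1' := min (i1 + b) (n - 1)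
      if i == 0 then solGo n m i i1' j j1 rest
      else if i + b < n then solGo n m (min (i + b) (n - 1)) i1' j j1 rest
      else 0
    else
      let i' := max (i - b) 0
      if i1 == n - 1 then solGo n m i' i1 j j1 rest
      else if i1 - b ≥ 0 then solGo n m i' (max (i1 - b) 0) j j1 rest
      else 0

-- queries[::-1] = queries.reverse (PySem.List.slice?_none_none_neg_one)
def solution (n : Int) (m : Int) (x : Int) (y : Int) (queries : List (Int × Int)) : Int :=
  solGo n m x x y y queries.reverse

-- ===== PORT B =====
-- generic per-axis routine: walk the moves maintaining [lo, hi]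
def rangeAfter : Int → Int → Int → List (Bool × Int) → Int
  | lo, hi, _limit, [] => |hi - lo| + 1
  | lo, hi, limit, (fwd, b) :: rest =>
    if fwd then
      let hi' := min (hi + b) (limit - 1)
      if lo == 0 then rangeAfter lo hi' limit rest
      else if lo + b < limit then rangeAfter (lo + b) hi' limit rest
      else 0
    else
      let lo' := max 0 (lo - b)
      if hi == limit - 1 then rangeAfter lo' hi limit rest
      else if hi - b ≥ 0 then rangeAfter lo' (hi - b) limit rest
      else 0

-- the splitting loop of B: one pass over reversed(queries), appending per axis
def splitMoves (queries : List (Int × Int)) : List (Bool × Int) × List (Bool × Int) :=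
  queries.reverse.foldl
    (fun (acc : List (Bool × Int) × List (Bool × Int)) (q : Int × Int) =>
      if q.1 == 0 then (acc.1 ++ [(true, q.2)], acc.2)
      else if q.1 == 1 then (acc.1 ++ [(false, q.2)], acc.2)
      else if q.1 == 2 then (acc.1, acc.2 ++ [(true, q.2)])
      else (acc.1, acc.2 ++ [(false, q.2)]))
    ([], [])

def solution_alt (n : Int) (m : Int) (x : Int) (y : Int) (queries : List (Int × Int)) : Int :=
  let p := splitMoves queries
  rangeAfter x x n p.2 * rangeAfter y y m p.1

-- ===== PRECONDITION & SPEC =====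
def Spec_solution (n : Int) (m : Int) (x : Int) (y : Int) (queries : List (Int × Int)) (out : Int) : Prop := out = solution_alt n m x y queries
instance (n : Int) (m : Int) (x : Int) (y : Int) (queries : List (Int × Int)) (out : Int) : Decidable (Spec_solution n m x y queries out) := by unfold Spec_solution; infer_instance

-- ===== CLAIM (what is proved, stated in full; the proofs are below) =====
def Claim_equal_solution : Prop := ∀ (n : Int) (m : Int) (x : Int) (y : Int) (queries : List (Int × Int)), Dom_solution n m x y queries → Spec_solution n m x y queries (solution n m x y queries)

-- ===== LEMMAS AND PROOFS =====

-- structural (cons-form) versions of the two move lists, for the induction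
def ymov : List (Int × Int) → List (Bool × Int)
  | [] => []
  | (a, b) :: t => if a == 0 then (true, b) :: ymov t
                   else if a == 1 then (false, b) :: ymov t else ymov t

def xmov : List (Int × Int) → List (Bool × Int)
  | [] => []
  | (a, b) :: t => if a == 0 || a == 1 then xmov t
                   else if a == 2 then (true, b) :: xmov t else (false, b) :: xmov t

theorem splitMoves_go (l : List (Int × Int)) :
    ∀ ym xm : List (Bool × Int),
      l.foldl
        (fun (acc : List (Bool × Int) × List (Bool × Int)) (q : Int × Int) =>
          if q.1 == 0 then (acc.1 ++ [(true, q.2)], acc.2)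
          else if q.1 == 1 then (acc.1 ++ [(false, q.2)], acc.2)
          else if q.1 == 2 then (acc.1, acc.2 ++ [(true, q.2)])
          else (acc.1, acc.2 ++ [(false, q.2)])) (ym, xm)
      = (ym ++ ymov l, xm ++ xmov l) := by
  induction l with
  | nil => simp [ymov, xmov]
  | cons hd tl ih =>
    intro ym xm
    obtain ⟨a, b⟩ := hd
    simp only [List.foldl_cons]
    by_cases h0 : a = 0
    · rw [if_pos (by simp [h0]), ih]; simp [ymov, xmov, h0]
    · by_cases h1 : a = 1
      · rw [if_neg (by simp [h0]), if_pos (by simp [h1]), ih]; simp [ymov, xmov, h1]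
      · by_cases h2 : a = 2
        · rw [if_neg (by simp [h0]), if_neg (by simp [h1]), if_pos (by simp [h2]), ih]
          simp [ymov, xmov, h1, h2]
        · rw [if_neg (by simp [h0]), if_neg (by simp [h1]), if_neg (by simp [h2]), ih]
          simp [ymov, xmov, h0, h1, h2]

theorem splitMoves_eq (queries : List (Int × Int)) :
    splitMoves queries = (ymov queries.reverse, xmov queries.reverse) := by
  have := splitMoves_go queries.reverse [] []
  simpa [splitMoves] using this

theorem solGo_eq_product (n m : Int) (l : List (Int × Int)) :
    ∀ i i1 j j1 : Int,
      solGo n m i i1 j j1 l = rangeAfter i i1 n (xmov l) * rangeAfter j j1 m (ymov l) := by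
  induction l with
  | nil =>
    intro i i1 j j1
    simp [solGo, rangeAfter, xmov, ymov, abs_sub_comm]
  | cons hd tl ih =>
    intro i i1 j j1
    obtain ⟨a, b⟩ := hd
    by_cases h0 : a = 0
    · subst h0
      by_cases hj : j = 0
      · simp [solGo, rangeAfter, ymov, xmov, hj, ih]
      · by_cases hb : j + b < m
        · simp [solGo, rangeAfter, ymov, xmov, hj, hb, ih]
        · simp [solGo, rangeAfter, ymov, xmov, hj, hb]
    · by_cases h1 : a = 1
      · subst h1
        by_cases hj : j1 = m - 1
        · simp [solGo, rangeAfter, ymov, xmov, hj, ih]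
        · by_cases hb : j1 - b ≥ 0
          · have hb' : b ≤ j1 := by omega
            simp [solGo, rangeAfter, ymov, xmov, hj, hb', ih]
          · have hb' : ¬ b ≤ j1 := by omega
            simp [solGo, rangeAfter, ymov, xmov, hj, hb']
      · by_cases h2 : a = 2
        · subst h2
          by_cases hi : i = 0
          · simp [solGo, rangeAfter, ymov, xmov, hi, ih]
          · by_cases hb : i + b < n
            · simp [solGo, rangeAfter, ymov, xmov, hi, hb, ih]
            · simp [solGo, rangeAfter, ymov, xmov, hi, hb]
        · by_cases hi : i1 = n - 1
          · simp [solGo, rangeAfter, ymov, xmov, h0, h1, h2, hi, ih, max_comm]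
          · by_cases hb : i1 - b ≥ 0
            · have hb' : b ≤ i1 := by omega
              simp [solGo, rangeAfter, ymov, xmov, h0, h1, h2, hi, hb', ih, max_comm]
            · have hb' : ¬ b ≤ i1 := by omega
              simp [solGo, rangeAfter, ymov, xmov, h0, h1, h2, hi, hb']

-- ===== VERDICT (by name: the statement is the Claim_ definition above) =====
theorem solution_spec : Claim_equal_solution := by
  intro n m x y queries _
  unfold Spec_solution solution solution_alt
  rw [splitMoves_eq]
  exact solGo_eq_product n m queries.reverse x x y y
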